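-- pv_equiv track=rewrite | github.com/iron512/thor | LN_usecase/main.py | is_path_controlled
-- ===== SOURCE A (Python) =====
-- def is_path_controlled(path: list[str], malicious_nodes: list[str]):
--     if path[0] in malicious_nodes or path[-1] in malicious_nodes:
--         return True
--
--     indexes = set()
--     for i in range(1, len(path) - 1):
--         if path[i] in malicious_nodes:
--             indexes.add(i - 1)
--             indexes.add(i)
--             indexes.add(i + 1)
--     return len(indexes) == len(path)
-- ===== SOURCE B (Python) =====
-- def is_path_controlled(path: list[str], malicious_nodes: list[str]):
--     if path[0] in malicious_nodes or path[-1] in malicious_nodes: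
--         return True
--     n = len(path)
--     bad = set(malicious_nodes)
--     return all(
--         any(1 <= k <= n - 2 and path[k] in bad for k in (j - 1, j, j + 1))
--         for j in range(n)
--     )
-- ===== Notes on version B (the rewrite author's own statement) =====
-- stated objective: alternative
-- what changed: Instead of accumulating the set of indices covered by interior malicious nodes and comparing its size to len(path), B checks each position directly: every position j must have a malicious node among the interior indices j-1, j, j+1 (endpoint guard kept; malicious membership via a set).
import Mathlib
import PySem

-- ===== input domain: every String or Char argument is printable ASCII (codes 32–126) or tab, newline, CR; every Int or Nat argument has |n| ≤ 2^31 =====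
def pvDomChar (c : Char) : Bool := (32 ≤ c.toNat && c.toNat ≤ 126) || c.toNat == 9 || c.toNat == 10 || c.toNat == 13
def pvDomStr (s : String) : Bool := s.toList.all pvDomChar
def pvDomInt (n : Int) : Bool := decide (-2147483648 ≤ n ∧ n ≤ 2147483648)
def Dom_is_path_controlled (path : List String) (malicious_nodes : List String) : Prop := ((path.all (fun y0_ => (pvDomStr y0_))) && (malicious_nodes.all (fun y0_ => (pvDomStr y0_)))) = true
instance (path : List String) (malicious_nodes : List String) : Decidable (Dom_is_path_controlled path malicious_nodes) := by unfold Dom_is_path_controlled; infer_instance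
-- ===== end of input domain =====

-- B replaces A's 'collect covered indices into a set and compare its size to len(path)'
-- by a direct per-position check ('alternative'): each position j must have a malicious
-- interior node among indices j-1, j, j+1. The endpoint guard is unchanged.

-- ===== PORT A =====
def is_path_controlled (path : List String) (malicious_nodes : List String) : Bool :=
  match PySem.List.pyGet? path 0, PySem.List.pyGet? path (-1) with
  | some h, some l =>
    if malicious_nodes.contains h || malicious_nodes.contains l then true
    else
      let indexes : PySem.Set Int :=
        (PySem.List.pyRange 1 (PySem.List.len path - 1) 1).foldl
          (fun s i =>
            if malicious_nodes.contains (PySem.List.pyGetD path i "") then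
              PySem.Set.add (PySem.Set.add (PySem.Set.add s (i - 1)) i) (i + 1)
            else s)
          PySem.Set.empty
      PySem.Set.len indexes == PySem.List.len path
  | _, _ => false   -- empty path: Python raises IndexError (excluded by Pre_)

-- ===== PORT B =====
def is_path_controlled_alt (path : List String) (malicious_nodes : List String) : Bool :=
  match PySem.List.pyGet? path 0 with
  | none => false   -- empty path: Python raises IndexError (excluded by Pre_)
  | some h =>
    match PySem.List.pyGet? path (-1) with
    | none => false
    | some l =>
      if malicious_nodes.contains h || malicious_nodes.contains l then true
      else
        let n : Int := PySem.List.len path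
        let bad : PySem.Set String := PySem.Set.ofList malicious_nodes
        (PySem.List.pyRange 0 n 1).all (fun j =>
          [j - 1, j, j + 1].any (fun k =>
            decide (1 ≤ k) && decide (k ≤ n - 2) &&
              PySem.Set.contains bad (PySem.List.pyGetD path k "")))

-- ===== PRECONDITION & SPEC =====
-- Pre_ excludes only the empty path, on which A (path[0]) raises IndexError.
def Pre_is_path_controlled (path : List String) (malicious_nodes : List String) : Prop := path ≠ []
instance (path : List String) (malicious_nodes : List String) : Decidable (Pre_is_path_controlled path malicious_nodes) := by unfold Pre_is_path_controlled; infer_instance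
def pvWitness_is_path_controlled : List String × List String := (["a", "b", "a"], ["b"])

def Spec_is_path_controlled (path : List String) (malicious_nodes : List String) (out : Bool) : Prop := out = is_path_controlled_alt path malicious_nodes
instance (path : List String) (malicious_nodes : List String) (out : Bool) : Decidable (Spec_is_path_controlled path malicious_nodes out) := by unfold Spec_is_path_controlled; infer_instance

-- ===== CLAIM (what is proved, stated in full; the proofs are below) =====
def Claim_equal_is_path_controlled : Prop := ∀ (path : List String) (malicious_nodes : List String), Dom_is_path_controlled path malicious_nodes → Pre_is_path_controlled path malicious_nodes → Spec_is_path_controlled path malicious_nodes (is_path_controlled path malicious_nodes)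

-- ===== LEMMAS AND PROOFS =====


-- membership in A's covering fold
theorem pv_mem_fold (p : Int → Bool) (l : List Int) (s : PySem.Set Int) (y : Int) :
    (y ∈ l.foldl (fun s i => if p i then
        PySem.Set.add (PySem.Set.add (PySem.Set.add s (i - 1)) i) (i + 1) else s) s)
    ↔ y ∈ s ∨ ∃ i ∈ l, p i = true ∧ (y = i - 1 ∨ y = i ∨ y = i + 1) := by
  induction l generalizing s with
  | nil => simp
  | cons a l ih =>
    by_cases hp : p a = true <;>
      simp [hp, ih, PySem.Set.mem_add, or_assoc]

-- A's fold keeps the set duplicate-free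
theorem pv_nodup_fold (p : Int → Bool) (l : List Int) (s : PySem.Set Int) (hs : s.Nodup) :
    (l.foldl (fun s i => if p i then
        PySem.Set.add (PySem.Set.add (PySem.Set.add s (i - 1)) i) (i + 1) else s) s).Nodup := by
  induction l generalizing s with
  | nil => exact hs
  | cons a l ih =>
    by_cases hp : p a = true <;> simp [hp]
    · exact ih _ (PySem.Set.nodup_add _ _ (PySem.Set.nodup_add _ _ (PySem.Set.nodup_add _ _ hs)))
    · exact ih _ hs

-- a duplicate-free sublist of a duplicate-free list has full length iff it exhausts it
theorem pv_len_eq_iff {S R : List Int} (hS : S.Nodup) (hR : R.Nodup) (hsub : ∀ x ∈ S, x ∈ R) :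
    S.length = R.length ↔ ∀ x ∈ R, x ∈ S := by
  constructor
  · intro hlen x hx
    have hsp : List.Subperm S R := List.subperm_of_subset hS hsub
    have hperm : List.Perm S R := hsp.perm_of_length_le (le_of_eq hlen.symm)
    exact hperm.mem_iff.mpr hx
  · intro h
    exact List.Perm.length_eq ((List.perm_ext_iff_of_nodup hS hR).mpr
      (fun x => ⟨hsub x, h x⟩))

-- the guard-false branches agree: counting covered indices = every position covered
theorem pv_core (path malicious_nodes : List String) :
    ((PySem.Set.len ((PySem.List.pyRange 1 (PySem.List.len path - 1) 1).foldl
        (fun s i =>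
          if malicious_nodes.contains (PySem.List.pyGetD path i "") then
            PySem.Set.add (PySem.Set.add (PySem.Set.add s (i - 1)) i) (i + 1)
          else s)
        PySem.Set.empty) == PySem.List.len path) : Bool)
    = (PySem.List.pyRange 0 (PySem.List.len path) 1).all (fun j =>
        [j - 1, j, j + 1].any (fun k =>
          decide (1 ≤ k) && decide (k ≤ PySem.List.len path - 2) &&
            PySem.Set.contains (PySem.Set.ofList malicious_nodes)
              (PySem.List.pyGetD path k ""))) := by
  set n : Int := PySem.List.len path with hn
  set p : Int → Bool := fun i => malicious_nodes.contains (PySem.List.pyGetD path i "") with hp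
  set S : PySem.Set Int := (PySem.List.pyRange 1 (n - 1) 1).foldl
      (fun s i => if p i then
        PySem.Set.add (PySem.Set.add (PySem.Set.add s (i - 1)) i) (i + 1) else s)
      PySem.Set.empty with hS
  set R : List Int := PySem.List.pyRange 0 n 1 with hR
  have hnn : 0 ≤ n := by rw [hn]; simp [PySem.List.len]
  have hmemS : ∀ y, y ∈ S ↔ ∃ i, 1 ≤ i ∧ i < n - 1 ∧ p i = true ∧
      (y = i - 1 ∨ y = i ∨ y = i + 1) := by
    intro y
    rw [hS, pv_mem_fold]
    simp [PySem.Set.empty, PySem.List.mem_pyRange_one, and_assoc]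
  have hSnodup : S.Nodup := pv_nodup_fold _ _ _ List.nodup_nil
  have hRnodup : R.Nodup := by rw [hR]; exact PySem.List.nodup_pyRange_one 0 n
  have hRlen : R.length = n.toNat := by
    rw [hR, PySem.List.length_pyRange_one]; omega
  have hmemR : ∀ y, y ∈ R ↔ 0 ≤ y ∧ y < n := by
    intro y; rw [hR, PySem.List.mem_pyRange_one]
  have hsub : ∀ x ∈ S, x ∈ R := by
    intro x hx
    obtain ⟨i, h1, h2, _, hj⟩ := (hmemS x).mp hx
    rw [hmemR]; omega
  have hwin : ∀ j, ([j - 1, j, j + 1].any (fun k =>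
          decide (1 ≤ k) && decide (k ≤ n - 2) &&
            PySem.Set.contains (PySem.Set.ofList malicious_nodes)
              (PySem.List.pyGetD path k ""))) = true
      ↔ ∃ k, (k = j - 1 ∨ k = j ∨ k = j + 1) ∧ 1 ≤ k ∧ k ≤ n - 2 ∧ p k = true := by
    intro j
    simp [PySem.Set.mem_ofList, hp, and_assoc]
  rw [Bool.eq_iff_iff]
  have hlen : PySem.Set.len S = (S.length : Int) := rfl
  rw [hlen, beq_iff_eq, List.all_eq_true]
  constructor
  · intro h j hj
    have hSl : S.length = R.length := by rw [hRlen]; omega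
    have hall := (pv_len_eq_iff hSnodup hRnodup hsub).mp hSl
    obtain ⟨i, h1, h2, hpi, hd⟩ := (hmemS j).mp (hall j hj)
    rw [hwin j]
    exact ⟨i, by omega, by omega, by omega, hpi⟩
  · intro h
    have hall : ∀ x ∈ R, x ∈ S := by
      intro j hj
      obtain ⟨k, hk, hk1, hk2, hkp⟩ := (hwin j).mp (h j hj)
      exact (hmemS j).mpr ⟨k, by omega, by omega, hkp, by omega⟩
    have := (pv_len_eq_iff hSnodup hRnodup hsub).mpr hall
    rw [this, hRlen]; omega

-- ===== VERDICT (by name: the statement is the Claim_ definition above) =====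
theorem is_path_controlled_spec : Claim_equal_is_path_controlled := by
  intro path malicious_nodes _ hpre
  unfold Spec_is_path_controlled
  obtain ⟨a, as, rfl⟩ := List.exists_cons_of_ne_nil hpre
  unfold is_path_controlled is_path_controlled_alt
  rw [PySem.List.pyGet?_zero_cons, PySem.List.pyGet?_neg_one,
    List.getLast?_eq_some_getLast (l := a :: as) (by simp)]
  dsimp only
  split_ifs with hg
  · rfl
  · exact pv_core (a :: as) malicious_nodes
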